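-- pv_equiv track=rewrite | github.com/xiyuanyang-code/My-Typst-Note | LectureNote/AlgorithmsNote/src/homework_4/6.py | get_max_value
-- ===== SOURCE A (Python) =====
-- from typing import List
--
-- def get_max_value(total: str, k: int, values: List[str]):
--     length = len(total)
--     dp = [0] * (length + 1)
--     for i in range(1, length + 1):
--         # case1:
--         if total[i - 1] in values:
--             dp[i] = max(dp[i - 1] + 1, dp[i])
--         else:
--             dp[i] = max(dp[i - 1], dp[i])
--
--         # case2:
--         if i-2 >= 0:
--             start = i-2
--             end = max(i-k, 0)
--             for j in range(start, end-1, -1):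
--                 split_str = total[j:i]
--                 if split_str in values:
--                     dp[i] = max(dp[i], dp[j]+1)
--                 else:
--                     dp[i] = max(dp[i], dp[j])
--
--     return dp[length]
-- ===== SOURCE B (Python) =====
-- def get_max_value(total, k, values):
--     # Dictionary-driven DP: for each position, try each candidate value directly
--     # (single characters always; longer values only within the window k),
--     # instead of scanning every window start position.
--     n = len(total)
--     dp = [0] * (n + 1)
--     for i in range(1, n + 1):
--         best = dp[i - 1]
--         for v in values:
--             L = len(v)
--             if L == 1:
--                 if v == total[i - 1]:
--                     best = max(best, dp[i - 1] + 1)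
--             elif 2 <= L <= k and L <= i and total[i - L:i] == v:
--                 best = max(best, dp[i - L] + 1)
--         dp[i] = best
--     return dp[n]
-- ===== Notes on version B (the rewrite author's own statement) =====
-- stated objective: alternative
-- what changed: A scans every window start j in [i-k, i-2] for each position i and tests each substring against the values list; B drives the DP by the candidate values themselves (single characters always, longer values only when their length fits the window k), so per-position work is bounded by the size of the values list instead of the window width times the list size.
import Mathlib
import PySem

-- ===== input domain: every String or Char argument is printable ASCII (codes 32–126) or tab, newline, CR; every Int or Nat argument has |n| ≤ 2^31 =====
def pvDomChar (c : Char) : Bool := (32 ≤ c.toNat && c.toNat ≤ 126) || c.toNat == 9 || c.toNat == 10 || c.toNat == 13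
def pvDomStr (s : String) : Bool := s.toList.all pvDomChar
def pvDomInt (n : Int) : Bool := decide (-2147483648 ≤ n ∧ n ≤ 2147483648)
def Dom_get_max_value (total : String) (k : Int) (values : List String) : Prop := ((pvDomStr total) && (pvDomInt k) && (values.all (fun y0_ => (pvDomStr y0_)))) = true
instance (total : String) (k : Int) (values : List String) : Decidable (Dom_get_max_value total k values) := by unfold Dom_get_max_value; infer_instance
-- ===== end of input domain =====

-- B replaces A's per-position scan over window starts by a scan over the candidate values themselves; a different algorithm with the same results.
-- ===== PORT A =====
-- total[i-1] as a 1-character string (the index is provably in range; the none case is unreachable)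
def pyCharAt (total : String) (i : Int) : String :=
  match PySem.Str.pyGet? total (i - 1) with
  | some ch => String.ofList [ch]
  | none => ""

-- body of A's inner loop over window starts j
def innerA (total : String) (values : List String) (i : Int) (dp : List Int) (j : Int) : List Int :=
  let split_str := PySem.Str.slice total (some j) (some i)
  if values.contains split_str then
    PySem.List.pySetD dp i (max (PySem.List.pyGetD dp i 0) (PySem.List.pyGetD dp j 0 + 1))
  else
    PySem.List.pySetD dp i (max (PySem.List.pyGetD dp i 0) (PySem.List.pyGetD dp j 0))

-- body of A's outer loop
def stepA (total : String) (k : Int) (values : List String) (dp : List Int) (i : Int) : List Int :=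
  -- case1
  let dp :=
    if values.contains (pyCharAt total i) then
      PySem.List.pySetD dp i (max (PySem.List.pyGetD dp (i - 1) 0 + 1) (PySem.List.pyGetD dp i 0))
    else
      PySem.List.pySetD dp i (max (PySem.List.pyGetD dp (i - 1) 0) (PySem.List.pyGetD dp i 0))
  -- case2
  if 0 ≤ i - 2 then
    (PySem.List.pyRange (i - 2) (max (i - k) 0 - 1) (-1)).foldl (innerA total values i) dp
  else dp

def get_max_value (total : String) (k : Int) (values : List String) : Int :=
  let length : Int := PySem.Str.len total
  let dp : List Int := List.replicate (length + 1).toNat 0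
  let dp := (PySem.List.pyRange 1 (length + 1) 1).foldl (stepA total k values) dp
  PySem.List.pyGetD dp length 0

-- ===== PORT B =====
-- body of B's loop over candidate values
def innerB (total : String) (k : Int) (i : Int) (dp : List Int) (best : Int) (v : String) : Int :=
  let L : Int := PySem.Str.len v
  if L = 1 then
    if v = pyCharAt total i then max best (PySem.List.pyGetD dp (i - 1) 0 + 1) else best
  else if 2 ≤ L ∧ L ≤ k ∧ L ≤ i ∧ PySem.Str.slice total (some (i - L)) (some i) = v then
    max best (PySem.List.pyGetD dp (i - L) 0 + 1)
  else best

def stepB (total : String) (k : Int) (values : List String) (dp : List Int) (i : Int) : List Int :=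
  let best := PySem.List.pyGetD dp (i - 1) 0
  let best := values.foldl (innerB total k i dp) best
  PySem.List.pySetD dp i best

def get_max_value_alt (total : String) (k : Int) (values : List String) : Int :=
  let n : Int := PySem.Str.len total
  let dp : List Int := List.replicate (n + 1).toNat 0
  let dp := (PySem.List.pyRange 1 (n + 1) 1).foldl (stepB total k values) dp
  PySem.List.pyGetD dp n 0

-- ===== PRECONDITION & SPEC =====
def Spec_get_max_value (total : String) (k : Int) (values : List String) (out : Int) : Prop := out = get_max_value_alt total k values
instance (total : String) (k : Int) (values : List String) (out : Int) : Decidable (Spec_get_max_value total k values out) := by unfold Spec_get_max_value; infer_instance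

-- ===== CLAIM (what is proved, stated in full; the proofs are below) =====
def Claim_equal_get_max_value : Prop := ∀ (total : String) (k : Int) (values : List String), Dom_get_max_value total k values → Spec_get_max_value total k values (get_max_value total k values)

-- ===== LEMMAS AND PROOFS =====

-- getD facts
theorem getD_set_self_int (l : List Int) (i : Nat) (h : i < l.length) (v d : Int) :
    (l.set i v).getD i d = v := by
  simp [List.getD_eq_getElem?_getD, List.getElem?_set, h]

theorem getD_set_ne_int (l : List Int) (i j : Nat) (h : i ≠ j) (v d : Int) :
    (l.set i v).getD j d = l.getD j d := by
  simp [List.getD_eq_getElem?_getD, List.getElem?_set, h]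

theorem getD_replicate_zero (m t : Nat) : (List.replicate m (0 : Int)).getD t 0 = 0 := by
  simp [List.getD_eq_getElem?_getD, List.getElem?_replicate]
  split <;> simp

theorem set_getD_self_eq (l : List Int) (i : Nat) (h : i < l.length) :
    l.set i (l.getD i 0) = l := by
  have : l.getD i 0 = l[i] := by simp [List.getD_eq_getElem?_getD, List.getElem?_eq_getElem h]
  rw [this, List.set_getElem_self]

-- generic scalar-fold facts
theorem foldl_init_le {α : Type} (f : Int → α → Int) (h1 : ∀ a x, a ≤ f a x) :
    ∀ (l : List α) (init : Int), init ≤ l.foldl f init := by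
  intro l
  induction l with
  | nil => intro init; simp
  | cons y l ih => intro init; exact le_trans (h1 init y) (ih (f init y))

theorem foldl_le_bound {α : Type} (f : Int → α → Int) (b : Int) :
    ∀ (l : List α) (init : Int), init ≤ b → (∀ a x, x ∈ l → a ≤ b → f a x ≤ b) →
      l.foldl f init ≤ b := by
  intro l
  induction l with
  | nil => intro init h _; simpa using h
  | cons y l ih =>
      intro init h hs
      exact ih (f init y) (hs init y (by simp) h)
        (fun a x hx ha => hs a x (by simp [hx]) ha)

theorem le_foldl_of_mem {α : Type} (f : Int → α → Int) (h1 : ∀ a x, a ≤ f a x)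
    (g : Int) (x : α) :
    ∀ (l : List α) (init : Int), x ∈ l → (∀ a, g ≤ f a x) → g ≤ l.foldl f init := by
  intro l
  induction l with
  | nil => intro init hx; simp at hx
  | cons y l ih =>
      intro init hx hg
      rcases List.mem_cons.mp hx with h | h
      · subst h
        exact le_trans (hg init) (foldl_init_le f h1 l (f init x))
      · exact ih (f init y) h hg

theorem foldl_congr_mem' {α : Type} (f g : Int → α → Int) :
    ∀ (l : List α) (init : Int), (∀ a x, x ∈ l → f a x = g a x) →
      l.foldl f init = l.foldl g init := by
  intro l
  induction l with
  | nil => intro _ _; rfl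
  | cons y l ih =>
      intro init h
      simp only [List.foldl_cons]
      rw [h init y (by simp)]
      exact ih (g init y) (fun a x hx => h a x (by simp [hx]))

-- the A-side inner-loop term read from a fixed dp
def tA (total : String) (values : List String) (i : Int) (dp : List Int) (j : Int) : Int :=
  if values.contains (PySem.Str.slice total (some j) (some i)) then
    PySem.List.pyGetD dp j 0 + 1
  else
    PySem.List.pyGetD dp j 0

theorem innerA_eq (total : String) (values : List String) (i : Int) (dp : List Int) (j : Int) :
    innerA total values i dp j
      = PySem.List.pySetD dp i (max (PySem.List.pyGetD dp i 0) (tA total values i dp j)) := by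
  by_cases h : PySem.Str.slice total (some j) (some i) ∈ values <;>
    simp [innerA, tA, h]

theorem innerA_foldl (total : String) (values : List String) (iN : Nat) (js : List Int)
    (hjs : ∀ j ∈ js, ∃ jn : Nat, j = (jn : Int) ∧ jn < iN) :
    ∀ dp : List Int, iN < dp.length →
      js.foldl (innerA total values (iN : Int)) dp
        = dp.set iN (js.foldl (fun a j => max a (tA total values (iN : Int) dp j)) (dp.getD iN 0)) := by
  induction js with
  | nil =>
      intro dp hlen
      simp only [List.foldl_nil]
      exact (set_getD_self_eq dp iN hlen).symm
  | cons j js ih =>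
      intro dp hlen
      obtain ⟨jn, hj, hjn⟩ := hjs j (by simp)
      simp only [List.foldl_cons]
      rw [innerA_eq]
      have hset : PySem.List.pySetD dp (iN : Int)
          (max (PySem.List.pyGetD dp (iN : Int) 0) (tA total values (iN : Int) dp j))
          = dp.set iN (max (dp.getD iN 0) (tA total values (iN : Int) dp j)) := by
        simp [PySem.List.pySetD_natCast, PySem.List.pyGetD_natCast]
      rw [hset]
      set x1 := max (dp.getD iN 0) (tA total values (iN : Int) dp j) with hx1
      have hlen' : iN < (dp.set iN x1).length := by simpa using hlen
      rw [ih (fun j' hj' => hjs j' (by simp [hj'])) (dp.set iN x1) hlen']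
      have hget : (dp.set iN x1).getD iN 0 = x1 := getD_set_self_int dp iN hlen x1 0
      have hterm : ∀ a j', j' ∈ js →
          (fun a j' => max a (tA total values (iN : Int) (dp.set iN x1) j')) a j'
            = (fun a j' => max a (tA total values (iN : Int) dp j')) a j' := by
        intro a j' hj'
        obtain ⟨j'n, hj'e, hj'n⟩ := hjs j' (by simp [hj'])
        subst hj'e
        simp only [tA, PySem.List.pyGetD_natCast]
        rw [getD_set_ne_int dp iN j'n (by omega)]
      rw [foldl_congr_mem' _ _ js _ hterm, hget, List.set_set]

-- the DP invariant carried along the outer loop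
def DPInv (n m : Nat) (dp : List Int) : Prop :=
  dp.length = n + 1 ∧ (∀ t : Nat, m < t → dp.getD t 0 = 0) ∧
    (∀ a b : Nat, a ≤ b → b ≤ m → dp.getD a 0 ≤ dp.getD b 0) ∧
    (∀ t : Nat, 0 ≤ dp.getD t 0)

theorem DPInv_set (n m : Nat) (dp : List Int) (V : Int) (h : DPInv n m dp)
    (hm : m + 1 ≤ n) (hV : dp.getD m 0 ≤ V) : DPInv n (m + 1) (dp.set (m + 1) V) := by
  obtain ⟨hlen, hz, hmono, hpos⟩ := h
  have hVpos : 0 ≤ V := le_trans (hpos m) hV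
  refine ⟨by simpa using hlen, ?_, ?_, ?_⟩
  · intro t ht
    rw [getD_set_ne_int dp (m+1) t (by omega)]
    exact hz t (by omega)
  · intro a b hab hbm
    by_cases hb : b = m + 1
    · subst hb
      rw [getD_set_self_int dp (m+1) (by omega) V 0]
      by_cases ha : a = m + 1
      · subst ha; rw [getD_set_self_int dp (m+1) (by omega) V 0]
      · rw [getD_set_ne_int dp (m+1) a (by omega)]
        exact le_trans (hmono a m (by omega) (le_refl m)) hV
    · rw [getD_set_ne_int dp (m+1) b (by omega), getD_set_ne_int dp (m+1) a (by omega)]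
      exact hmono a b hab (by omega)
  · intro t
    by_cases ht : t = m + 1
    · subst ht; rw [getD_set_self_int dp (m+1) (by omega) V 0]; exact hVpos
    · rw [getD_set_ne_int dp (m+1) t (by omega)]; exact hpos t

-- length facts for the strings the loops test
theorem len_pyCharAt (total : String) (m : Nat) (hm : m < total.toList.length) :
    PySem.Str.len (pyCharAt total ((m : Int) + 1)) = 1 := by
  unfold pyCharAt
  have h1 : ((m : Int) + 1 - 1) = ((m : Nat) : Int) := by ring
  rw [h1, PySem.Str.pyGet?_natCast, List.getElem?_eq_getElem hm]
  simp [PySem.Str.len_eq]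

theorem len_slice_str (total : String) (j i : Int) (h0 : 0 ≤ j) (hji : j ≤ i)
    (hin : i ≤ (total.toList.length : Int)) :
    PySem.Str.len (PySem.Str.slice total (some j) (some i)) = i - j := by
  rw [PySem.Str.len_eq, PySem.Str.toList_slice, PySem.Chars.slice_eq_listSlice,
    PySem.List.slice_toNat _ h0 (le_trans h0 hji)]
  simp only [List.length_take, List.length_drop]
  omega

-- the values the two step functions store at position m+1
def x1v (total : String) (values : List String) (dp : List Int) (m : Nat) : Int :=
  if pyCharAt total ((m : Int) + 1) ∈ values then dp.getD m 0 + 1 else dp.getD m 0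

def jsOf (k : Int) (m : Nat) : List Int :=
  PySem.List.pyRange ((m : Int) + 1 - 2) (max ((m : Int) + 1 - k) 0 - 1) (-1)

def VAv (total : String) (k : Int) (values : List String) (dp : List Int) (m : Nat) : Int :=
  (jsOf k m).foldl (fun a j => max a (tA total values ((m : Int) + 1) dp j)) (x1v total values dp m)

def VBv (total : String) (k : Int) (values : List String) (dp : List Int) (m : Nat) : Int :=
  values.foldl (innerB total k ((m : Int) + 1) dp) (dp.getD m 0)

theorem getD_le_x1v (total : String) (values : List String) (dp : List Int) (m : Nat) :
    dp.getD m 0 ≤ x1v total values dp m := by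
  rw [x1v]; split <;> omega

theorem x1v_le_VAv (total : String) (k : Int) (values : List String) (dp : List Int) (m : Nat) :
    x1v total values dp m ≤ VAv total k values dp m :=
  foldl_init_le _ (fun a j => le_max_left _ _) _ _

theorem innerB_le (total : String) (k i : Int) (dp : List Int) :
    ∀ (a : Int) (v : String), a ≤ innerB total k i dp a v := by
  intro a v
  simp only [innerB]
  split_ifs <;> simp

theorem stepA_run (total : String) (k : Int) (values : List String) (m : Nat)
    (hm : m + 1 ≤ total.toList.length) (dp : List Int)
    (hI : DPInv total.toList.length m dp) :
    stepA total k values dp ((m : Int) + 1) = dp.set (m + 1) (VAv total k values dp m) := by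
  obtain ⟨hlen, hz, hmono, hpos⟩ := hI
  have hgm : PySem.List.pyGetD dp ((m : Int) + 1 - 1) 0 = dp.getD m 0 := by
    have h : ((m : Int) + 1 - 1) = ((m : Nat) : Int) := by ring
    rw [h, PySem.List.pyGetD_natCast]
  have hgi : PySem.List.pyGetD dp ((m : Int) + 1) 0 = 0 := by
    have h : ((m : Int) + 1) = (((m + 1 : Nat)) : Int) := by push_cast; ring
    rw [h, PySem.List.pyGetD_natCast]
    exact hz (m + 1) (by omega)
  have hset : ∀ v : Int, PySem.List.pySetD dp ((m : Int) + 1) v = dp.set (m + 1) v := by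
    intro v
    have h : ((m : Int) + 1) = (((m + 1 : Nat)) : Int) := by push_cast; ring
    rw [h, PySem.List.pySetD_natCast]
  have hcase1 : (if values.contains (pyCharAt total ((m : Int) + 1)) then
        PySem.List.pySetD dp ((m : Int) + 1)
          (max (PySem.List.pyGetD dp ((m : Int) + 1 - 1) 0 + 1) (PySem.List.pyGetD dp ((m : Int) + 1) 0))
      else
        PySem.List.pySetD dp ((m : Int) + 1)
          (max (PySem.List.pyGetD dp ((m : Int) + 1 - 1) 0) (PySem.List.pyGetD dp ((m : Int) + 1) 0)))
      = dp.set (m + 1) (x1v total values dp m) := by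
    rw [hgm, hgi]
    by_cases hc : pyCharAt total ((m : Int) + 1) ∈ values
    · rw [if_pos (List.contains_iff_mem.mpr hc), hset, x1v, if_pos hc]
      congr 1
      have := hpos m; omega
    · rw [if_neg (by simpa using hc), hset, x1v, if_neg hc]
      congr 1
      have := hpos m; omega
  simp only [stepA]
  rw [hcase1]
  by_cases hm0 : m = 0
  · subst hm0
    rw [if_neg (by norm_num)]
    have hnil : jsOf k 0 = [] := by
      rw [jsOf]
      exact PySem.List.pyRange_neg_one_eq_nil (by omega)
    rw [VAv, hnil]
    rfl
  · rw [if_pos (by omega)]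
    have hjsdef : PySem.List.pyRange ((m : Int) + 1 - 2) (max ((m : Int) + 1 - k) 0 - 1) (-1) = jsOf k m := rfl
    rw [hjsdef]
    have hjs : ∀ j ∈ jsOf k m, ∃ jn : Nat, j = (jn : Int) ∧ jn < m + 1 := by
      intro j hj
      rw [jsOf, PySem.List.mem_pyRange_neg_one] at hj
      exact ⟨j.toNat, by omega, by omega⟩
    have hlen' : m + 1 < (dp.set (m + 1) (x1v total values dp m)).length := by
      rw [List.length_set, hlen]; omega
    have hcast : (((m + 1 : Nat)) : Int) = (m : Int) + 1 := by push_cast; ring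
    have hstep := innerA_foldl total values (m + 1) (jsOf k m) hjs
      (dp.set (m + 1) (x1v total values dp m)) hlen'
    rw [hcast] at hstep
    rw [hstep]
    rw [getD_set_self_int dp (m + 1) (by omega) _ 0]
    have hterm : ∀ (a : Int) (j : Int), j ∈ jsOf k m →
        (fun a j => max a (tA total values ((m : Int) + 1) (dp.set (m + 1) (x1v total values dp m)) j)) a j
          = (fun a j => max a (tA total values ((m : Int) + 1) dp j)) a j := by
      intro a j hj
      obtain ⟨jn, hje, hjn⟩ := hjs j hj
      subst hje
      simp only [tA, PySem.List.pyGetD_natCast]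
      rw [getD_set_ne_int dp (m + 1) jn (by omega)]
    rw [foldl_congr_mem' _ _ (jsOf k m) _ hterm, List.set_set]
    rfl

theorem stepB_run (total : String) (k : Int) (values : List String) (m : Nat)
    (dp : List Int) :
    stepB total k values dp ((m : Int) + 1) = dp.set (m + 1) (VBv total k values dp m) := by
  simp only [stepB, VBv]
  have hgm : PySem.List.pyGetD dp ((m : Int) + 1 - 1) 0 = dp.getD m 0 := by
    have h : ((m : Int) + 1 - 1) = ((m : Nat) : Int) := by ring
    rw [h, PySem.List.pyGetD_natCast]
  have hset : ∀ v : Int, PySem.List.pySetD dp ((m : Int) + 1) v = dp.set (m + 1) v := by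
    intro v
    have h : ((m : Int) + 1) = (((m + 1 : Nat)) : Int) := by push_cast; ring
    rw [h, PySem.List.pySetD_natCast]
  rw [hgm, hset]

theorem VA_eq_VB (total : String) (k : Int) (values : List String) (m : Nat)
    (hm : m + 1 ≤ total.toList.length) (dp : List Int)
    (hI : DPInv total.toList.length m dp) :
    VAv total k values dp m = VBv total k values dp m := by
  obtain ⟨hlen, hz, hmono, hpos⟩ := hI
  have hBle : ∀ (a : Int) (v : String), a ≤ innerB total k ((m : Int) + 1) dp a v :=
    innerB_le _ _ _ _
  have hAle : ∀ (a j : Int), a ≤ (fun a j => max a (tA total values ((m : Int) + 1) dp j)) a j :=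
    fun a j => le_max_left _ _
  have hgm : PySem.List.pyGetD dp ((m : Int) + 1 - 1) 0 = dp.getD m 0 := by
    have h : ((m : Int) + 1 - 1) = ((m : Nat) : Int) := by ring
    rw [h, PySem.List.pyGetD_natCast]
  have hinitB : dp.getD m 0 ≤ VBv total k values dp m := by
    rw [VBv]; exact foldl_init_le _ hBle _ _
  have hmlt : m < total.toList.length := by omega
  have hLc := len_pyCharAt total m hmlt
  have hx1B : x1v total values dp m ≤ VBv total k values dp m := by
    rw [x1v]
    split_ifs with hc
    · rw [VBv]
      apply le_foldl_of_mem _ hBle _ _ _ _ hc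
      intro a
      simp only [innerB]
      rw [hLc, if_pos rfl, if_pos trivial, hgm]
      exact le_max_right _ _
    · exact hinitB
  have hx1A : x1v total values dp m ≤ VAv total k values dp m := x1v_le_VAv total k values dp m
  apply le_antisymm
  · -- VAv ≤ VBv
    rw [VAv]
    apply foldl_le_bound _ _ _ _ hx1B
    intro a j hj ha
    apply max_le ha
    rw [jsOf, PySem.List.mem_pyRange_neg_one] at hj
    have hj0 : 0 ≤ j := by omega
    have hjm' : j ≤ (m : Int) - 1 := by omega
    have hjk : (m : Int) + 1 - j ≤ k := by omega
    have hjn : j = ((j.toNat : Nat) : Int) := by omega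
    by_cases hct : PySem.Str.slice total (some j) (some ((m : Int) + 1)) ∈ values
    · have hLv : PySem.Str.len (PySem.Str.slice total (some j) (some ((m : Int) + 1)))
          = (m : Int) + 1 - j := len_slice_str total j _ hj0 (by omega) (by omega)
      have htAj : tA total values ((m : Int) + 1) dp j = dp.getD j.toNat 0 + 1 := by
        rw [tA, if_pos (List.contains_iff_mem.mpr hct), hjn, PySem.List.pyGetD_natCast,
          Int.toNat_natCast]
      rw [htAj, VBv]
      apply le_foldl_of_mem _ hBle _ _ _ _ hct
      intro a'
      simp only [innerB]
      rw [hLv, if_neg (by omega)]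
      have harg : (m : Int) + 1 - ((m : Int) + 1 - j) = j := by ring
      rw [harg, if_pos ⟨by omega, hjk, by omega, rfl⟩]
      rw [hjn, PySem.List.pyGetD_natCast]
      exact le_max_right _ _
    · have htAj : tA total values ((m : Int) + 1) dp j = dp.getD j.toNat 0 := by
        rw [tA, if_neg (by simpa using hct), hjn, PySem.List.pyGetD_natCast,
          Int.toNat_natCast]
      rw [htAj]
      exact le_trans (hmono j.toNat m (by omega) (le_refl m)) hinitB
  · -- VBv ≤ VAv
    rw [VBv]
    apply foldl_le_bound
    · exact le_trans (getD_le_x1v total values dp m) hx1A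
    · intro a v hv ha
      simp only [innerB]
      split_ifs with h1 h2 h3
      · apply max_le ha
        have hc : pyCharAt total ((m : Int) + 1) ∈ values := h2 ▸ hv
        have hx : x1v total values dp m = dp.getD m 0 + 1 := by rw [x1v, if_pos hc]
        rw [hgm, ← hx]
        exact hx1A
      · exact ha
      · obtain ⟨hL2, hLk, hLi, hsl⟩ := h3
        set j : Int := (m : Int) + 1 - PySem.Str.len v with hjdef
        have hjmem : j ∈ jsOf k m := by
          rw [jsOf, PySem.List.mem_pyRange_neg_one]
          constructor <;> omega
        have htAj : tA total values ((m : Int) + 1) dp j = PySem.List.pyGetD dp j 0 + 1 := by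
          rw [tA, if_pos]
          rw [hsl]
          exact List.contains_iff_mem.mpr hv
        apply max_le ha
        have hterm : tA total values ((m : Int) + 1) dp j ≤ VAv total k values dp m := by
          rw [VAv]
          exact le_foldl_of_mem _ hAle _ _ _ _ hjmem (fun a' => le_max_right _ _)
        rw [htAj] at hterm
        exact hterm
      · exact ha

theorem step_eq (total : String) (k : Int) (values : List String) (m : Nat)
    (hm : m + 1 ≤ total.toList.length) (dp : List Int)
    (hI : DPInv total.toList.length m dp) :
    ∃ V : Int, dp.getD m 0 ≤ V ∧
      stepA total k values dp ((m : Int) + 1) = dp.set (m + 1) V ∧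
      stepB total k values dp ((m : Int) + 1) = dp.set (m + 1) V := by
  refine ⟨VAv total k values dp m, ?_, stepA_run total k values m hm dp hI, ?_⟩
  · exact le_trans (getD_le_x1v total values dp m) (x1v_le_VAv total k values dp m)
  · rw [stepB_run total k values m dp, VA_eq_VB total k values m hm dp hI]

theorem loop_eq (total : String) (k : Int) (values : List String) :
    ∀ m : Nat, m ≤ total.toList.length →
      ((PySem.List.pyRange 1 ((m : Int) + 1) 1).foldl (stepB total k values)
          (List.replicate (total.toList.length + 1) (0 : Int))
        = (PySem.List.pyRange 1 ((m : Int) + 1) 1).foldl (stepA total k values)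
          (List.replicate (total.toList.length + 1) (0 : Int)))
      ∧ DPInv total.toList.length m
          ((PySem.List.pyRange 1 ((m : Int) + 1) 1).foldl (stepA total k values)
            (List.replicate (total.toList.length + 1) (0 : Int))) := by
  intro m
  induction m with
  | zero =>
      intro _
      have hnil : PySem.List.pyRange 1 (((0 : Nat) : Int) + 1) 1 = [] :=
        PySem.List.pyRange_one_eq_nil (by norm_num)
      rw [hnil]
      simp only [List.foldl_nil]
      refine ⟨trivial, by simp, ?_, ?_, ?_⟩
      · intro t _; exact getD_replicate_zero _ t
      · intro a b _ _; rw [getD_replicate_zero, getD_replicate_zero]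
      · intro t; rw [getD_replicate_zero]
  | succ m ih =>
      intro hm
      obtain ⟨heq, hInv⟩ := ih (by omega)
      have hsplit : PySem.List.pyRange 1 (((m + 1 : Nat) : Int) + 1) 1
          = PySem.List.pyRange 1 ((m : Int) + 1) 1 ++ [(m : Int) + 1] := by
        have h1 : (((m + 1 : Nat)) : Int) + 1 = ((m : Int) + 1) + 1 := by push_cast; ring
        rw [h1]
        exact PySem.List.pyRange_one_succ_right (by omega)
      rw [hsplit, List.foldl_append, List.foldl_append]
      obtain ⟨V, hV, hA, hB⟩ := step_eq total k values m hm _ hInv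
      constructor
      · rw [heq]
        simp only [List.foldl_cons, List.foldl_nil]
        rw [hA, hB]
      · simp only [List.foldl_cons, List.foldl_nil]
        rw [hA]
        exact DPInv_set _ _ _ _ hInv hm hV

-- ===== VERDICT (by name: the statement is the Claim_ definition above) =====
theorem get_max_value_spec : Claim_equal_get_max_value := by
  unfold Claim_equal_get_max_value
  intro total k values _
  unfold Spec_get_max_value
  simp only [get_max_value, get_max_value_alt]
  have hlen : PySem.Str.len total = (total.toList.length : Int) := PySem.Str.len_eq total
  simp only [hlen]
  have ht : ((total.toList.length : Int) + 1).toNat = total.toList.length + 1 := by omega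
  simp only [ht]
  obtain ⟨heq, _⟩ := loop_eq total k values total.toList.length (le_refl _)
  rw [heq]
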